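-- pv_equiv track=rewrite | github.com/sebastianspicker/ai-pdf-renamer | src/ai_pdf_renamer/text_utils.py | subtract_tokens
-- ===== SOURCE A (Python) =====
-- from collections.abc import Iterable
--
-- def tokens_similar(token_a: str, token_b: str) -> bool:
--     """Check if two tokens are similar (case-insensitive equal, or one is a prefix of the other within 2 chars)."""
--     a = token_a.lower()
--     b = token_b.lower()
--     if a == b:
--         return True
--     return bool((a.startswith(b) or b.startswith(a)) and abs(len(a) - len(b)) <= 2)
--
-- def subtract_tokens(main_tokens: Iterable[str], remove_tokens: Iterable[str]) -> list[str]: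
--     """Remove tokens from main_tokens that are similar to any token in remove_tokens."""
--     remove = [t for t in (rt.strip() for rt in remove_tokens) if t]
--     result: list[str] = []
--     for token in (t.strip() for t in main_tokens):
--         if not token:
--             continue
--         if any(tokens_similar(token, rt) for rt in remove):
--             continue
--         result.append(token)
--     return result
-- ===== SOURCE B (Python) =====
-- def subtract_tokens(main_tokens, remove_tokens):
--     """Remove tokens from main_tokens that are similar to any token in remove_tokens."""
--     exact = set()
--     chopped = set()
--     for rt in remove_tokens:
--         r = rt.strip().lower()
--         if not r:
--             continue
--         exact.add(r)
--         chopped.add(r[:-1])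
--         chopped.add(r[:-2])
--     result = []
--     for tok in main_tokens:
--         t = tok.strip()
--         if not t:
--             continue
--         l = t.lower()
--         n = len(l)
--         if l in chopped or any(m > 0 and l[:m] in exact for m in (n, n - 1, n - 2)):
--             continue
--         result.append(t)
--     return result
-- ===== Notes on version B (the rewrite author's own statement) =====
-- stated objective: faster
-- what changed: Replaced A's nested scan (each main token similarity-tested against every remove token via startswith) with two sets built once from the remove tokens (lowered tokens plus their 1- and 2-char chops), so each main token is decided by a constant number of set lookups of its own prefixes.
import Mathlib
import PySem

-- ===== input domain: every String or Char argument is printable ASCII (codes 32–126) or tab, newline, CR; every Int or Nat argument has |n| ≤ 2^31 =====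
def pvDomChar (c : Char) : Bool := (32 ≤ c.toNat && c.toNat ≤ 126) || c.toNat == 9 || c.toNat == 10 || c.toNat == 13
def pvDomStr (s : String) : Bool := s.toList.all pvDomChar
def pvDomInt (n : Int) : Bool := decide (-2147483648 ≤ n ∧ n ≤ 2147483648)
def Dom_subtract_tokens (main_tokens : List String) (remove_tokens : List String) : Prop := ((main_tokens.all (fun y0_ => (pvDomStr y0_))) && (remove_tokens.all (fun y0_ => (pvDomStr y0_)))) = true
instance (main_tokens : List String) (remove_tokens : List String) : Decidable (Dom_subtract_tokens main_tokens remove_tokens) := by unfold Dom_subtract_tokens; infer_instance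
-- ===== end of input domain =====

-- B replaces A's nested scan (every main token similarity-tested against every remove token)
-- by two hash sets built once from the remove tokens (exact lowered tokens, and their 1- and
-- 2-char chops), so each main token needs only O(1) set lookups of its own chops; objective: faster.

-- ===== PORT A =====
def tokens_similar (token_a : String) (token_b : String) : Bool :=
  let a := PySem.Str.lower token_a
  let b := PySem.Str.lower token_b
  if a = b then true
  else (PySem.Str.startswith a b || PySem.Str.startswith b a) &&
       decide ((PySem.Str.len a - PySem.Str.len b).natAbs ≤ 2)

def subtract_tokens (main_tokens : List String) (remove_tokens : List String) : List String :=
  let remove := (remove_tokens.map (fun rt => PySem.Str.strip rt)).filter (fun t => t ≠ "")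
  main_tokens.foldl (fun result t0 =>
    let token := PySem.Str.strip t0
    if token = "" then result
    else if remove.any (fun rt => tokens_similar token rt) then result
    else result ++ [token]) []

-- ===== PORT B =====
def subtract_tokens_alt (main_tokens : List String) (remove_tokens : List String) : List String :=
  let sets := remove_tokens.foldl (fun (st : PySem.Set String × PySem.Set String) rt =>
      let r := PySem.Str.lower (PySem.Str.strip rt)
      if r = "" then st
      else (PySem.Set.add st.1 r,
            PySem.Set.add (PySem.Set.add st.2 (PySem.Str.slice r none (some (-1))))
                          (PySem.Str.slice r none (some (-2)))))
    (PySem.Set.empty, PySem.Set.empty)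
  main_tokens.foldl (fun result tok =>
    let t := PySem.Str.strip tok
    if t = "" then result
    else
      let l := PySem.Str.lower t
      let n := PySem.Str.len l
      if PySem.Set.contains sets.2 l ||
         ([n, n - 1, n - 2].any (fun m => decide (0 < m) && PySem.Set.contains sets.1 (PySem.Str.slice l none (some m))))
      then result
      else result ++ [t]) []

-- ===== PRECONDITION & SPEC =====
def Spec_subtract_tokens (main_tokens : List String) (remove_tokens : List String) (out : List String) : Prop := out = subtract_tokens_alt main_tokens remove_tokens
instance (main_tokens : List String) (remove_tokens : List String) (out : List String) : Decidable (Spec_subtract_tokens main_tokens remove_tokens out) := by unfold Spec_subtract_tokens; infer_instance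

-- ===== CLAIM (what is proved, stated in full; the proofs are below) =====
def Claim_equal_subtract_tokens : Prop := ∀ (main_tokens : List String) (remove_tokens : List String), Dom_subtract_tokens main_tokens remove_tokens → Spec_subtract_tokens main_tokens remove_tokens (subtract_tokens main_tokens remove_tokens)

-- ===== LEMMAS AND PROOFS =====

-- the pair of sets B builds from remove_tokens (definitionally the fold in subtract_tokens_alt)
def bSets (remove_tokens : List String) : PySem.Set String × PySem.Set String :=
  remove_tokens.foldl (fun (st : PySem.Set String × PySem.Set String) rt =>
      let r := PySem.Str.lower (PySem.Str.strip rt)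
      if r = "" then st
      else (PySem.Set.add st.1 r,
            PySem.Set.add (PySem.Set.add st.2 (PySem.Str.slice r none (some (-1))))
                          (PySem.Str.slice r none (some (-2)))))
    (PySem.Set.empty, PySem.Set.empty)

lemma lower_eq_empty_iff (s : String) : PySem.Str.lower s = "" ↔ s = "" := by
  rw [← String.toList_inj, ← String.toList_inj]
  simp [PySem.Chars.lower, String.toList_eq_nil_iff]

lemma mem_bSets_aux (remove : List String) :
    ∀ (st : PySem.Set String × PySem.Set String) (x : String),
      (x ∈ (remove.foldl (fun (st : PySem.Set String × PySem.Set String) rt =>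
          let r := PySem.Str.lower (PySem.Str.strip rt)
          if r = "" then st
          else (PySem.Set.add st.1 r,
                PySem.Set.add (PySem.Set.add st.2 (PySem.Str.slice r none (some (-1))))
                              (PySem.Str.slice r none (some (-2))))) st).1 ↔
        (x ∈ st.1 ∨ ∃ rt ∈ remove, PySem.Str.strip rt ≠ "" ∧
            x = PySem.Str.lower (PySem.Str.strip rt))) ∧
      (x ∈ (remove.foldl (fun (st : PySem.Set String × PySem.Set String) rt =>
          let r := PySem.Str.lower (PySem.Str.strip rt)
          if r = "" then st
          else (PySem.Set.add st.1 r,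
                PySem.Set.add (PySem.Set.add st.2 (PySem.Str.slice r none (some (-1))))
                              (PySem.Str.slice r none (some (-2))))) st).2 ↔
        (x ∈ st.2 ∨ ∃ rt ∈ remove, PySem.Str.strip rt ≠ "" ∧
            (x = PySem.Str.slice (PySem.Str.lower (PySem.Str.strip rt)) none (some (-1)) ∨
             x = PySem.Str.slice (PySem.Str.lower (PySem.Str.strip rt)) none (some (-2))))) := by
  induction remove with
  | nil => intro st x; simp
  | cons rt rest ih =>
    intro st x
    simp only [List.foldl_cons, List.mem_cons]
    by_cases h : PySem.Str.lower (PySem.Str.strip rt) = ""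
    · have h' : PySem.Str.strip rt = "" := (lower_eq_empty_iff _).mp h
      simp only [h, if_true]
      rcases ih st x with ⟨ih1, ih2⟩
      constructor
      · rw [ih1]
        constructor
        · rintro (hh | hh); exacts [Or.inl hh, Or.inr (by rcases hh with ⟨y, hy, hy2, hy3⟩; exact ⟨y, Or.inr hy, hy2, hy3⟩)]
        · rintro (hh | ⟨y, (rfl | hy), hy2, hy3⟩)
          exacts [Or.inl hh, absurd h' hy2, Or.inr ⟨y, hy, hy2, hy3⟩]
      · rw [ih2]
        constructor
        · rintro (hh | ⟨y, hy, hy2, hy3⟩); exacts [Or.inl hh, Or.inr ⟨y, Or.inr hy, hy2, hy3⟩]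
        · rintro (hh | ⟨y, (rfl | hy), hy2, hy3⟩)
          exacts [Or.inl hh, absurd h' hy2, Or.inr ⟨y, hy, hy2, hy3⟩]
    · have h' : PySem.Str.strip rt ≠ "" := fun e => h (by rw [e]; rfl)
      simp only [h, if_false]
      rcases ih _ x with ⟨ih1, ih2⟩
      constructor
      · rw [ih1]
        simp only [PySem.Set.mem_add]
        constructor
        · rintro ((hh | rfl) | ⟨y, hy, hy2, hy3⟩)
          exacts [Or.inl hh, Or.inr ⟨rt, Or.inl rfl, h', rfl⟩, Or.inr ⟨y, Or.inr hy, hy2, hy3⟩]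
        · rintro (hh | ⟨y, (rfl | hy), hy2, hy3⟩)
          exacts [Or.inl (Or.inl hh), Or.inl (Or.inr hy3), Or.inr ⟨y, hy, hy2, hy3⟩]
      · rw [ih2]
        simp only [PySem.Set.mem_add]
        constructor
        · rintro (((hh | rfl) | rfl) | ⟨y, hy, hy2, hy3⟩)
          exacts [Or.inl hh, Or.inr ⟨rt, Or.inl rfl, h', Or.inl rfl⟩,
                  Or.inr ⟨rt, Or.inl rfl, h', Or.inr rfl⟩, Or.inr ⟨y, Or.inr hy, hy2, hy3⟩]
        · rintro (hh | ⟨y, (rfl | hy), hy2, (hy3 | hy3)⟩)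
          exacts [Or.inl (Or.inl (Or.inl hh)), Or.inl (Or.inl (Or.inr hy3)), Or.inl (Or.inr hy3),
                  Or.inr ⟨y, hy, hy2, Or.inl hy3⟩, Or.inr ⟨y, hy, hy2, Or.inr hy3⟩]

lemma mem_bSets (remove : List String) (x : String) :
    (x ∈ (bSets remove).1 ↔ ∃ rt ∈ remove, PySem.Str.strip rt ≠ "" ∧
        x = PySem.Str.lower (PySem.Str.strip rt)) ∧
    (x ∈ (bSets remove).2 ↔ ∃ rt ∈ remove, PySem.Str.strip rt ≠ "" ∧
        (x = PySem.Str.slice (PySem.Str.lower (PySem.Str.strip rt)) none (some (-1)) ∨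
         x = PySem.Str.slice (PySem.Str.lower (PySem.Str.strip rt)) none (some (-2)))) := by
  rcases mem_bSets_aux remove (PySem.Set.empty, PySem.Set.empty) x with ⟨h1, h2⟩
  exact ⟨by rw [bSets, h1]; simp [PySem.Set.empty], by rw [bSets, h2]; simp [PySem.Set.empty]⟩


-- core characterisation of prefix-similarity, on char lists
lemma similar_chars_iff (A B : List Char) (hA : A ≠ []) (hB : B ≠ []) :
    (A = B ∨ ((B <+: A ∨ A <+: B) ∧ ((A.length : Int) - B.length).natAbs ≤ 2)) ↔
    (A = B.dropLast ∨ A = B.take (B.length - 2) ∨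
      ∃ m : Int, (m = (A.length : Int) ∨ m = (A.length : Int) - 1 ∨ m = (A.length : Int) - 2) ∧
        0 < m ∧ A.take m.toNat = B) := by
  have hA' : 0 < A.length := List.length_pos_iff.mpr hA
  have hB' : 0 < B.length := List.length_pos_iff.mpr hB
  constructor
  · rintro (rfl | ⟨(hpre | hpre), hd⟩)
    · exact Or.inr (Or.inr ⟨A.length, Or.inl rfl, by exact_mod_cast hA', by simp⟩)
    · have hle : B.length ≤ A.length := hpre.length_le
      have hBtake : B = A.take B.length := List.prefix_iff_eq_take.mp hpre
      refine Or.inr (Or.inr ⟨(B.length : Int), by omega, by exact_mod_cast hB', ?_⟩)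
      rw [Int.toNat_natCast]; exact hBtake.symm
    · have hle : A.length ≤ B.length := hpre.length_le
      have hAtake : A = B.take A.length := List.prefix_iff_eq_take.mp hpre
      have hd2 : B.length = A.length ∨ B.length = A.length + 1 ∨ B.length = A.length + 2 := by omega
      rcases hd2 with h | h | h
      · refine Or.inr (Or.inr ⟨(A.length : Int), Or.inl rfl, by exact_mod_cast hA', ?_⟩)
        rw [Int.toNat_natCast]
        have : A = B := by rw [hAtake, ← h, List.take_length]
        rw [← this, List.take_length]
      · exact Or.inl (by rw [List.dropLast_eq_take, h, Nat.add_sub_cancel, ← hAtake])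
      · exact Or.inr (Or.inl (by rw [h, Nat.add_sub_cancel, ← hAtake]))
  · rintro (h | h | ⟨m, hm, hpos, hval⟩)
    · have hlen : A.length = B.length - 1 := by rw [h, List.length_dropLast]
      refine Or.inr ⟨Or.inr (h ▸ List.dropLast_prefix B), ?_⟩
      have : 2 ≤ B.length := by omega
      simp only [hlen]; omega
    · have hlen : A.length = min (B.length - 2) B.length := by rw [h, List.length_take]
      refine Or.inr ⟨Or.inr (h ▸ List.take_prefix _ B), ?_⟩
      have h3 : 3 ≤ B.length := by omega
      simp only [hlen]; omega
    · have hBpre : B <+: A := hval ▸ List.take_prefix _ A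
      have hlen : B.length = min m.toNat A.length := by rw [← hval, List.length_take]
      refine Or.inr ⟨Or.inl hBpre, ?_⟩
      omega


-- the same, phrased on the Strings the two ports compare
lemma tokens_similar_iff (t s : String) (ht : t ≠ "") (hs : s ≠ "") :
    tokens_similar t s = true ↔
      (PySem.Str.lower t = PySem.Str.slice (PySem.Str.lower s) none (some (-1)) ∨
       PySem.Str.lower t = PySem.Str.slice (PySem.Str.lower s) none (some (-2)) ∨
       ∃ m : Int, (m = PySem.Str.len (PySem.Str.lower t) ∨
                   m = PySem.Str.len (PySem.Str.lower t) - 1 ∨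
                   m = PySem.Str.len (PySem.Str.lower t) - 2) ∧
         0 < m ∧ PySem.Str.slice (PySem.Str.lower t) none (some m) = PySem.Str.lower s) := by
  set a := PySem.Str.lower t with ha
  set b := PySem.Str.lower s with hb
  have hA : a.toList ≠ [] := by
    rw [ne_eq, String.toList_eq_nil_iff, ha, lower_eq_empty_iff]; exact ht
  have hB : b.toList ≠ [] := by
    rw [ne_eq, String.toList_eq_nil_iff, hb, lower_eq_empty_iff]; exact hs
  have hL : tokens_similar t s = true ↔
      (a.toList = b.toList ∨ ((b.toList <+: a.toList ∨ a.toList <+: b.toList) ∧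
        ((a.toList.length : Int) - b.toList.length).natAbs ≤ 2)) := by
    unfold tokens_similar
    rw [← ha, ← hb]
    by_cases h : a = b
    · simp [h]
    · simp only [h, if_false, Bool.and_eq_true, Bool.or_eq_true, decide_eq_true_eq]
      constructor
      · rintro ⟨h1, h2⟩
        refine Or.inr ⟨?_, ?_⟩
        · rcases h1 with h1 | h1
          · exact Or.inl ((PySem.Chars.startswith_iff _ _).mp (by simpa using h1))
          · exact Or.inr ((PySem.Chars.startswith_iff _ _).mp (by simpa using h1))
        · simpa using h2
      · rintro (hh | ⟨h1, h2⟩)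
        · exact absurd (String.toList_inj.mp hh) h
        · refine ⟨?_, by simpa using h2⟩
          rcases h1 with h1 | h1
          · exact Or.inl (by simpa using (PySem.Chars.startswith_iff _ _).mpr h1)
          · exact Or.inr (by simpa using (PySem.Chars.startswith_iff _ _).mpr h1)
  rw [hL, similar_chars_iff _ _ hA hB]
  have e1 : (PySem.Str.slice b none (some (-1))).toList = b.toList.dropLast := by
    simp [PySem.List.slice_to_neg_one]
  have e2 : (PySem.Str.slice b none (some (-2))).toList = b.toList.take (b.toList.length - 2) := by
    simp only [PySem.Str.toList_slice, PySem.Chars.slice_eq_listSlice]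
    rw [PySem.List.slice_to_neg_ofNat _ 2 (by omega)]
  have e3 : ∀ m : Int, 0 < m → (PySem.Str.slice a none (some m)).toList = a.toList.take m.toNat := by
    intro m hm
    simp only [PySem.Str.toList_slice, PySem.Chars.slice_eq_listSlice]
    rw [PySem.List.slice_to _ (le_of_lt hm)]
  have e4 : PySem.Str.len a = (a.toList.length : Int) := by simp
  constructor
  · rintro (h | h | ⟨m, hm, hpos, hval⟩)
    · exact Or.inl (by rw [← String.toList_inj, e1]; exact h)
    · exact Or.inr (Or.inl (by rw [← String.toList_inj, e2]; exact h))
    · exact Or.inr (Or.inr ⟨m, by rw [e4]; exact hm, hpos,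
        by rw [← String.toList_inj, e3 m hpos]; exact hval⟩)
  · rintro (h | h | ⟨m, hm, hpos, hval⟩)
    · exact Or.inl (by rw [← String.toList_inj, e1] at h; exact h)
    · exact Or.inr (Or.inl (by rw [← String.toList_inj, e2] at h; exact h))
    · exact Or.inr (Or.inr ⟨m, by rw [e4] at hm; exact hm, hpos,
        by rw [← String.toList_inj, e3 m hpos] at hval; exact hval⟩)


-- pointwise equality of the two kept/removed tests
lemma cond_eq (remove : List String) (t : String) (ht : t ≠ "") :
    ((remove.map (fun rt => PySem.Str.strip rt)).filter (fun x => x ≠ "")).any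
        (fun rt => tokens_similar t rt) =
      (PySem.Set.contains (bSets remove).2 (PySem.Str.lower t) ||
       ([PySem.Str.len (PySem.Str.lower t), PySem.Str.len (PySem.Str.lower t) - 1,
         PySem.Str.len (PySem.Str.lower t) - 2].any (fun m =>
          decide (0 < m) && PySem.Set.contains (bSets remove).1
            (PySem.Str.slice (PySem.Str.lower t) none (some m))))) := by
  rw [Bool.eq_iff_iff]
  simp only [List.any_eq_true, List.mem_filter, List.mem_map, Bool.or_eq_true,
    Bool.and_eq_true, decide_eq_true_eq, PySem.Set.contains_iff, ne_eq,
    (mem_bSets remove _).1, (mem_bSets remove _).2, List.mem_cons,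
    List.not_mem_nil, or_false]
  constructor
  · rintro ⟨x, ⟨⟨rt, hrt, rfl⟩, hne⟩, hsim⟩
    have hne' : PySem.Str.strip rt ≠ "" := fun e => hne (by simp [e])
    rcases (tokens_similar_iff t _ ht hne').mp hsim with h | h | ⟨m, hm, hpos, hval⟩
    · exact Or.inl ⟨rt, hrt, hne', Or.inl h⟩
    · exact Or.inl ⟨rt, hrt, hne', Or.inr h⟩
    · exact Or.inr ⟨m, hm, hpos, rt, hrt, hne', hval⟩
  · rintro (⟨rt, hrt, hne, hch⟩ | ⟨m, hm, hpos, rt, hrt, hne, hval⟩)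
    · exact ⟨PySem.Str.strip rt, ⟨⟨rt, hrt, rfl⟩, by simpa using hne⟩,
        (tokens_similar_iff t _ ht hne).mpr (hch.elim Or.inl (fun h => Or.inr (Or.inl h)))⟩
    · exact ⟨PySem.Str.strip rt, ⟨⟨rt, hrt, rfl⟩, by simpa using hne⟩,
        (tokens_similar_iff t _ ht hne).mpr (Or.inr (Or.inr ⟨m, hm, hpos, hval⟩))⟩


-- ===== VERDICT (by name: the statement is the Claim_ definition above) =====
theorem subtract_tokens_spec : Claim_equal_subtract_tokens := by
  intro main remove _
  show subtract_tokens main remove = subtract_tokens_alt main remove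
  unfold subtract_tokens subtract_tokens_alt
  show main.foldl _ [] = main.foldl _ []
  congr 1
  funext result t0
  by_cases h : PySem.Str.strip t0 = ""
  · simp [h]
  · simp only [h, if_false]
    rw [cond_eq remove (PySem.Str.strip t0) h]
    rfl
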